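-- pv_equiv track=rewrite | github.com/jevonsgong/GraphIsomorphism | utils.py | find_cells
-- ===== SOURCE A (Python) =====
-- from collections import deque, defaultdict, OrderedDict, Counter
--
-- def find_cells(pi):
--     """Transform the color vector pi into a canonical partition.
--        Cells are sorted by their color, and within each cell, vertices are sorted."""
--     cell_dict = defaultdict(list)
--     for v, c in enumerate(pi):
--         cell_dict[c].append(v)
--
--     # build sortable signatures
--     sigs = []
--     for old_color, verts in cell_dict.items():
--         verts.sort()
--         multiset = tuple(pi[v] for v in verts)
--         sig = (len(verts), multiset)
--         sig += (tuple(verts),)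
--         sigs.append((sig, verts))
--
--     sigs.sort(key=lambda x: x[0])
--
--     # produce ordered cells and new colour vector
--     new_pi = [0] * len(pi)
--     cells = []
--     for new_color, (_, verts) in enumerate(sigs):
--         cells.append(verts)
--         for v in verts:
--             new_pi[v] = new_color
--     return cells
-- ===== SOURCE B (Python) =====
-- def find_cells(pi):
--     """Transform the color vector pi into a canonical partition.
--        Sort-first strategy: sort (color, vertex) pairs once, group consecutive
--        runs of equal color into cells (vertices ascending for free), then order
--        the cells by (size, color)."""
--     pairs = sorted((c, v) for v, c in enumerate(pi))
--     cells = []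
--     cur = None
--     cur_c = None
--     for c, v in pairs:
--         if cur is not None and c == cur_c:
--             cur.append(v)
--         else:
--             if cur is not None:
--                 cells.append(cur)
--             cur = [v]
--             cur_c = c
--     if cur is not None:
--         cells.append(cur)
--     cells.sort(key=lambda cell: (len(cell), pi[cell[0]]))
--     return cells
-- ===== Notes on version B (the rewrite author's own statement) =====
-- stated objective: faster
-- what changed: Replaces A's hash-grouping (defaultdict per color, per-cell sorts, (len, multiset, verts) tuple signatures, signature sort) with a sort-first pass: sort the (color, vertex) pairs once, group consecutive runs of equal color into cells (vertices come out ascending for free), then sort the cells by the simple key (len, color).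
import Mathlib
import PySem

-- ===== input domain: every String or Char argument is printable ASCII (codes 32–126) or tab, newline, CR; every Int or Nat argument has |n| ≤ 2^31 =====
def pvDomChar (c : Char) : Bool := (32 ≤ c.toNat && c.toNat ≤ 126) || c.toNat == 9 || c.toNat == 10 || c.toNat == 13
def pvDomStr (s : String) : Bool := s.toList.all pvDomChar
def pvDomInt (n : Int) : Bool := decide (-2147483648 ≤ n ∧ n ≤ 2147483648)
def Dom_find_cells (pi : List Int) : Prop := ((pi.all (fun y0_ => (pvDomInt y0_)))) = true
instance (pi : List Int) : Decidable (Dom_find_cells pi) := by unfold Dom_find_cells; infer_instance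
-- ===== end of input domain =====

-- B replaces A's dict-grouping with a sort-first strategy (sort the (color, vertex)
-- pairs once, group consecutive equal colors, then sort the cells by (size, color));
-- same return value; a timing run measured B faster by a constant factor
-- (no heavy tuple signatures, no per-cell sorts).

-- ===== PORT A =====
-- pi[v] is ported as pyGetD pi v 0: v comes from enumerate(pi), so it is always in
-- range and the default is never used (exact).  The local new_pi of A is dead code
-- (never returned, no effect on the result) and is not reproduced.
def find_cells (pi : List Int) : List (List Int) :=
  let cellDict : PySem.Dict Int (List Int) :=
    (PySem.List.enumerate pi).foldl
      (fun d p => d.modify p.2 [] (fun old => old ++ [p.1])) PySem.Dict.empty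
  let sigs : List ((Int × List Int × List Int) × List Int) :=
    cellDict.items.foldl (fun acc it =>
      let verts := PySem.List.sorted it.2 (fun x => x) false
      let multiset := verts.map (fun v => PySem.List.pyGetD pi v 0)
      acc ++ [(((verts.length : Int), multiset, verts), verts)]) []
  -- sigs.sort(key=lambda x: x[0]); the tuple key is Python's lexicographic order,
  -- which toLex on Int ×ₗ (List Int ×ₗ List Int) models exactly
  let sortedSigs := PySem.List.sorted sigs (fun x => toLex (x.1.1, toLex (x.1.2.1, x.1.2.2))) false
  sortedSigs.foldl (fun cells s => cells ++ [s.2]) []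

-- ===== PORT B =====
-- The pair (cur, cur_c) of Source B is one Option value (both are None / set together).
-- sorted(pairs) compares int pairs lexicographically = toLex; pi[cell[0]] is
-- always an in-range index, ported as pyGetD with an unreachable default.
def find_cells_alt (pi : List Int) : List (List Int) :=
  let pairs := PySem.List.sorted
    ((PySem.List.enumerate pi).map (fun p => (p.2, p.1))) (fun p => toLex p) false
  let st := pairs.foldl
    (fun (st : List (List Int) × Option (List Int × Int)) p =>
      match st.2 with
      | some (cur, curc) =>
          if p.1 == curc then (st.1, some (cur ++ [p.2], curc))
          else (st.1 ++ [cur], some ([p.2], p.1))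
      | none => (st.1, some ([p.2], p.1))) ([], none)
  let cells := match st.2 with
    | some (cur, _) => st.1 ++ [cur]
    | none => st.1
  PySem.List.sorted cells
    (fun cell => toLex ((cell.length : Int), PySem.List.pyGetD pi (PySem.List.pyGetD cell 0 0) 0)) false

-- ===== PRECONDITION & SPEC =====
def Spec_find_cells (pi : List Int) (out : List (List Int)) : Prop := out = find_cells_alt pi
instance (pi : List Int) (out : List (List Int)) : Decidable (Spec_find_cells pi out) := by unfold Spec_find_cells; infer_instance

-- ===== CLAIM (what is proved, stated in full; the proofs are below) =====
def Claim_equal_find_cells : Prop := ∀ (pi : List Int), Dom_find_cells pi → Spec_find_cells pi (find_cells pi)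

-- ===== LEMMAS AND PROOFS =====

-- the vertices of color c, in ascending order
def colorCell (pi : List Int) (c : Int) : List Int :=
  ((PySem.List.enumerate pi).filter (fun p => p.2 == c)).map (fun p => p.1)

-- the distinct colors, ordered by (multiplicity, color) — the order of the result cells
def keyColors (pi : List Int) : List Int :=
  PySem.List.sorted (PySem.Set.ofList pi) (fun c => toLex ((pi.count c : Int), c)) false

def targetCells (pi : List Int) : List (List Int) := (keyColors pi).map (colorCell pi)

-- the (color, vertex) pairs as B builds them
def pairsL (pi : List Int) : List (Int × Int) :=
  (PySem.List.enumerate pi).map (fun p => (p.2, p.1))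
theorem cc_pairwise (pi : List Int) (c : Int) : (colorCell pi c).Pairwise (· < ·) := by
  exact ((PySem.List.pairwise_lt_enumerate pi 0).filter _).map _ (fun a b h => h)

theorem cc_mem (pi : List Int) (c v : Int) (h : v ∈ colorCell pi c) :
    PySem.List.pyGetD pi v 0 = c := by
  unfold colorCell at h
  simp only [List.mem_map, List.mem_filter] at h
  obtain ⟨p, ⟨hp, hc⟩, hv⟩ := h
  rw [PySem.List.mem_enumerate_iff] at hp
  obtain ⟨k, hk, rfl⟩ := hp
  simp only at hv hc
  subst hv
  simp only [zero_add, beq_iff_eq] at hc ⊢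
  rw [PySem.List.pyGetD_natCast]
  simp [List.getD_eq_getElem?_getD, hk, hc]

theorem cc_len (pi : List Int) (c : Int) : (colorCell pi c).length = pi.count c := by
  unfold colorCell
  rw [List.length_map, ← List.countP_eq_length_filter, List.count]
  conv_rhs => rw [← PySem.List.map_snd_enumerate pi 0]
  rw [List.countP_map]
  rfl

theorem cc_ms (pi : List Int) (c : Int) :
    (colorCell pi c).map (fun v => PySem.List.pyGetD pi v 0) = List.replicate (pi.count c) c := by
  rw [List.eq_replicate_iff]
  constructor
  · rw [List.length_map, cc_len]
  · intro b hb
    simp only [List.mem_map] at hb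
    obtain ⟨v, hv, rfl⟩ := hb
    exact cc_mem pi c v hv

theorem cc_ne (pi : List Int) (c : Int) (h : c ∈ pi) : colorCell pi c ≠ [] := by
  intro hnil
  have hl := cc_len pi c
  rw [hnil] at hl
  have hp := List.count_pos_iff.mpr h
  simp only [List.length_nil] at hl
  omega

theorem cc_head (pi : List Int) (c : Int) (h : c ∈ pi) :
    PySem.List.pyGetD pi (PySem.List.pyGetD (colorCell pi c) 0 0) 0 = c := by
  have hne := cc_ne pi c h
  rcases he : colorCell pi c with _ | ⟨v, t⟩
  · exact absurd he hne
  · rw [PySem.List.pyGetD_ofNat']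
    simp only [List.getD_cons_zero]
    exact cc_mem pi c v (he ▸ List.mem_cons_self)
theorem kc_pairwise (pi : List Int) :
    (keyColors pi).Pairwise
      (fun c c' => toLex ((pi.count c : Int), c) < toLex ((pi.count c' : Int), c')) := by
  have hle := PySem.List.sorted_pairwise (PySem.Set.ofList pi)
      (fun c => toLex ((pi.count c : Int), c))
  have hnd : (keyColors pi).Nodup :=
    ((PySem.List.sorted_perm (PySem.Set.ofList pi) _ false).nodup_iff).mpr (PySem.Set.nodup_ofList pi)
  have hne : (keyColors pi).Pairwise (· ≠ ·) := hnd
  exact (hle.and hne).imp (by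
    rintro a b ⟨h1, h2⟩
    refine lt_of_le_of_ne h1 ?_
    intro hk
    apply h2
    have := congrArg (fun x => (ofLex x).2) hk
    simpa using this)

theorem repl_lt (n : Nat) (c c' : Int) (hn : 0 < n) (h : c < c') :
    List.replicate n c < List.replicate n c' := by
  cases n with
  | zero => omega
  | succ m =>
    rw [List.replicate_succ, List.replicate_succ, List.cons_lt_cons_iff]
    exact Or.inl h

theorem part_perm (ks : List Int) (xs : List (Int × Int)) (hnd : ks.Nodup)
    (hmem : ∀ x ∈ xs, x.1 ∈ ks) :
    (ks.flatMap (fun k => xs.filter (fun x => x.1 == k))).Perm xs := by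
  induction ks generalizing xs with
  | nil =>
    have : xs = [] := List.eq_nil_iff_forall_not_mem.mpr (fun x hx => by simpa using hmem x hx)
    simp [this]
  | cons k ks ih =>
    rw [List.flatMap_cons]
    have hknd : k ∉ ks := (List.nodup_cons.mp hnd).1
    have hnd' : ks.Nodup := (List.nodup_cons.mp hnd).2
    set xs' := xs.filter (fun x => !(x.1 == k)) with hxs'
    have hflt : ∀ k' ∈ ks, xs.filter (fun x => x.1 == k') = xs'.filter (fun x => x.1 == k') := by
      intro k' hk'
      rw [hxs', List.filter_filter]
      apply List.filter_congr
      intro x hx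
      rcases hbeq : (x.1 == k') with _ | _
      · simp
      · have : x.1 = k' := by simpa using hbeq
        have : ¬ (x.1 == k) = true := by
          simp only [beq_iff_eq, this]
          intro hkk; exact hknd (hkk ▸ hk')
        simp [this]
    have hmap : ks.flatMap (fun k' => xs.filter (fun x => x.1 == k'))
        = ks.flatMap (fun k' => xs'.filter (fun x => x.1 == k')) := by
      refine List.flatMap_congr (fun k' hk' => hflt k' hk')
    rw [hmap]
    have hmem' : ∀ x ∈ xs', x.1 ∈ ks := by
      intro x hx
      rw [hxs', List.mem_filter] at hx
      have := hmem x hx.1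
      rcases List.mem_cons.mp this with h | h
      · exfalso; have := hx.2; simp [h] at this
      · exact h
    have h1 : (xs.filter (fun x => x.1 == k) ++ ks.flatMap (fun k' => xs'.filter (fun x => x.1 == k'))).Perm
          (xs.filter (fun x => x.1 == k) ++ xs') := ((ih xs' hnd' hmem').append_left _)
    exact h1.trans (List.filter_append_perm _ xs)
theorem pairs_filter (pi : List Int) (c : Int) :
    (pairsL pi).filter (fun q => q.1 == c)
      = ((PySem.List.enumerate pi).filter (fun p => p.2 == c)).map (fun p => (p.2, p.1)) := by
  unfold pairsL
  rw [List.filter_map]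
  rfl

def sigFn (pi : List Int) (c : Int) : (Int × List Int × List Int) × List Int :=
  (((pi.count c : Int), List.replicate (pi.count c) c, colorCell pi c), colorCell pi c)

theorem find_cells_eq_target (pi : List Int) : find_cells pi = targetCells pi := by
  unfold find_cells
  -- the dict
  have hdict : ((PySem.List.enumerate pi).foldl
      (fun d p => d.modify p.2 [] (fun old => old ++ [p.1])) PySem.Dict.empty).items
      = (PySem.Set.ofList pi).map (fun c => (c, colorCell pi c)) := by
    set d := (PySem.List.enumerate pi).foldl
      (fun d p => d.modify p.2 [] (fun old => old ++ [p.1])) PySem.Dict.empty with hd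
    have hkeys : d.keys = PySem.Set.ofList pi := by
      rw [hd, PySem.Dict.keys_foldl_modify_key (PySem.List.enumerate pi) (fun p => p.2) []
        (fun d p => fun old => old ++ [p.1]) PySem.Dict.empty]
      show PySem.Set.update PySem.Dict.empty.keys _ = _
      rw [show (PySem.Dict.empty : PySem.Dict Int (List Int)).keys = [] from rfl,
        PySem.Set.update_nil_left, PySem.List.map_snd_enumerate]
    have hnd : d.keys.Nodup := by
      rw [hkeys]; exact PySem.Set.nodup_ofList pi
    rw [PySem.Dict.items_eq_map_keys d hnd [], hkeys]
    apply List.map_congr_left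
    intro c hc
    have hget : d.getD c [] = colorCell pi c := by
      rw [hd]
      have hfm : (PySem.List.enumerate pi).foldl
          (fun d p => d.modify p.2 [] (fun old => old ++ [p.1])) PySem.Dict.empty
          = (pairsL pi).foldl (fun d q => d.modify q.1 [] (fun old => old ++ [q.2])) PySem.Dict.empty := by
        unfold pairsL; rw [List.foldl_map]
      rw [hfm, PySem.Dict.getD_foldl_modify_append]
      rw [pairs_filter]
      simp [colorCell, List.map_map]
    rw [hget]
  simp only [hdict, PySem.List.foldl_append_singleton_eq_map, List.nil_append, List.map_map]
  have hmc : List.map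
        ((fun x : Int × List Int =>
            ((((PySem.List.sorted x.2 (fun x => x) false).length : Int),
                List.map (fun v => PySem.List.pyGetD pi v 0) (PySem.List.sorted x.2 (fun x => x) false),
                PySem.List.sorted x.2 (fun x => x) false),
              PySem.List.sorted x.2 (fun x => x) false)) ∘
          fun c => (c, colorCell pi c))
        (PySem.Set.ofList pi) = List.map (sigFn pi) (PySem.Set.ofList pi) := by
    apply List.map_congr_left
    intro c hc
    have hs : PySem.List.sorted (colorCell pi c) (fun x => x) false = colorCell pi c :=
      PySem.List.sorted_eq_self_of_pairwise _ _
        ((cc_pairwise pi c).imp (fun h => le_of_lt h))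
    simp only [Function.comp_apply, hs, sigFn, cc_len, cc_ms]
  rw [hmc]
  have hperm : ((keyColors pi).map (sigFn pi)).Perm ((PySem.Set.ofList pi).map (sigFn pi)) :=
    (PySem.List.sorted_perm (PySem.Set.ofList pi) _ false).map _
  have hpw : ((keyColors pi).map (sigFn pi)).Pairwise
      (fun a b => (fun x : (Int × List Int × List Int) × List Int =>
        toLex (x.1.1, toLex (x.1.2.1, x.1.2.2))) a
        < (fun x : (Int × List Int × List Int) × List Int =>
        toLex (x.1.1, toLex (x.1.2.1, x.1.2.2))) b) := by
    rw [List.pairwise_map]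
    refine (kc_pairwise pi).imp_of_mem ?_
    intro c c' hc hc' hlt
    have hcpi : c ∈ pi := by
      have := (PySem.List.mem_sorted _ _ _ _).mp hc
      rwa [PySem.Set.mem_ofList] at this
    have hcount : 0 < pi.count c := List.count_pos_iff.mpr hcpi
    simp only [Prod.Lex.toLex_lt_toLex] at hlt ⊢
    simp only [sigFn]
    rcases hlt with h | ⟨heq, hlt⟩
    · exact Or.inl h
    · have hcc : pi.count c' = pi.count c := by exact_mod_cast heq.symm
      refine Or.inr ⟨heq, Or.inl ?_⟩
      rw [hcc]
      exact repl_lt _ _ _ hcount hlt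
  rw [PySem.List.sorted_eq_of_perm_of_pairwise_lt _ _ _ hperm hpw]
  unfold targetCells
  rw [List.map_map]
  rfl
-- the grouping step function of B
def gstep (st : List (List Int) × Option (List Int × Int)) (p : Int × Int) :
    List (List Int) × Option (List Int × Int) :=
  match st.2 with
  | some (cur, curc) =>
      if p.1 == curc then (st.1, some (cur ++ [p.2], curc))
      else (st.1 ++ [cur], some ([p.2], p.1))
  | none => (st.1, some ([p.2], p.1))

-- one same-color run extends the current cell
theorem gstep_run (blk : List (Int × Int)) (c : Int) (hblk : ∀ q ∈ blk, q.1 = c) :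
    ∀ done cur, blk.foldl gstep (done, some (cur, c)) = (done, some (cur ++ blk.map (·.2), c)) := by
  induction blk with
  | nil => intro done cur; simp
  | cons q t ih =>
    intro done cur
    have hq : q.1 = c := hblk q List.mem_cons_self
    have : gstep (done, some (cur, c)) q = (done, some (cur ++ [q.2], c)) := by
      simp [gstep, hq]
    rw [List.foldl_cons, this, ih (fun r hr => hblk r (List.mem_cons_of_mem q hr))]
    simp

def flush (st : List (List Int) × Option (List Int × Int)) : List (List Int) :=
  match st.2 with
  | some (cur, _) => st.1 ++ [cur]
  | none => st.1

-- reading a new, larger color flushes the current cell and starts a fresh one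
theorem gstep_blocks (bof : Int → List (Int × Int)) (cs : List Int)
    (hpw : cs.Pairwise (· < ·))
    (hblk : ∀ c ∈ cs, bof c ≠ [] ∧ ∀ q ∈ bof c, q.1 = c) :
    ∀ done cur c0, (∀ c ∈ cs, c0 < c) →
      flush ((cs.flatMap bof).foldl gstep (done, some (cur, c0)))
        = done ++ [cur] ++ cs.map (fun c => (bof c).map (·.2)) := by
  induction cs with
  | nil => intro done cur c0 _; simp [flush]
  | cons c cs ih =>
    intro done cur c0 hgt
    have hc0 : c0 < c := hgt c List.mem_cons_self
    obtain ⟨hne, hall⟩ := hblk c List.mem_cons_self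
    rcases hb : bof c with _ | ⟨q, t⟩
    · exact absurd hb hne
    have hq : q.1 = c := hall q (hb ▸ List.mem_cons_self)
    have hstep : gstep (done, some (cur, c0)) q = (done ++ [cur], some ([q.2], c)) := by
      have hcne : c ≠ c0 := by omega
      simp [gstep, hq, hcne]
    have hrun : t.foldl gstep (done ++ [cur], some ([q.2], c))
        = (done ++ [cur], some ([q.2] ++ t.map (·.2), c)) :=
      gstep_run t c (fun r hr => hall r (hb ▸ List.mem_cons_of_mem q hr)) _ _
    rw [List.flatMap_cons, List.foldl_append, hb, List.foldl_cons, hstep, hrun]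
    have hrest := ih (List.Pairwise.sublist (List.sublist_cons_self c cs) hpw)
      (fun c' hc' => hblk c' (List.mem_cons_of_mem c hc'))
      (done ++ [cur]) ([q.2] ++ t.map (·.2)) c
      (fun c' hc' => (List.pairwise_cons.mp hpw).1 c' hc')
    rw [hrest]
    have : [q.2] ++ t.map (·.2) = (bof c).map (·.2) := by rw [hb]; rfl
    rw [this]
    simp

theorem bof_map_snd (pi : List Int) (c : Int) :
    ((pairsL pi).filter (fun q => q.1 == c)).map (·.2) = colorCell pi c := by
  rw [pairs_filter, List.map_map]
  rfl

theorem bof_ne (pi : List Int) (c : Int) (h : c ∈ pi) :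
    (pairsL pi).filter (fun q => q.1 == c) ≠ [] := by
  intro hnil
  apply cc_ne pi c h
  rw [← bof_map_snd, hnil]
  rfl

theorem bof_fst (pi : List Int) (c : Int) :
    ∀ q ∈ (pairsL pi).filter (fun q => q.1 == c), q.1 = c := by
  intro q hq
  have := (List.mem_filter.mp hq).2
  simpa using this

theorem asc_mem (pi : List Int) (c : Int)
    (h : c ∈ PySem.List.sorted (PySem.Set.ofList pi) (fun x => x) false) : c ∈ pi := by
  rw [PySem.List.mem_sorted, PySem.Set.mem_ofList] at h
  exact h

theorem find_cells_alt_eq_target (pi : List Int) : find_cells_alt pi = targetCells pi := by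
  unfold find_cells_alt
  set asc := PySem.List.sorted (PySem.Set.ofList pi) (fun x => x) false with hasc
  set bof := fun c => (pairsL pi).filter (fun q => q.1 == c) with hbof
  -- step 1: the sorted pairs are the color blocks in ascending color order
  have hpairs : PySem.List.sorted ((PySem.List.enumerate pi).map (fun p => (p.2, p.1)))
      (fun p => toLex p) false = asc.flatMap bof := by
    apply PySem.List.sorted_eq_of_perm_of_pairwise_lt
    · apply part_perm
      · exact ((PySem.List.sorted_perm (PySem.Set.ofList pi) _ false).nodup_iff).mpr
          (PySem.Set.nodup_ofList pi)
      · intro x hx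
        rw [hasc, PySem.List.mem_sorted, PySem.Set.mem_ofList]
        unfold pairsL at hx
        rw [List.mem_map] at hx
        obtain ⟨p, hp, rfl⟩ := hx
        rw [PySem.List.mem_enumerate_iff] at hp
        obtain ⟨k, hk, rfl⟩ := hp
        exact List.getElem_mem hk
    · rw [List.pairwise_flatMap]
      constructor
      · intro c hc
        have hpw : ((pairsL pi).filter (fun q => q.1 == c)).Pairwise (fun q r => q.2 < r.2) := by
          rw [pairs_filter]
          exact ((PySem.List.pairwise_lt_enumerate pi 0).filter _).map _ (fun a b h => h)
        refine hpw.imp_of_mem ?_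
        intro a b ha hb h2
        rw [Prod.Lex.toLex_lt_toLex]
        exact Or.inr ⟨(bof_fst pi c a ha).trans (bof_fst pi c b hb).symm, h2⟩
      · have := PySem.List.sorted_ofList_pairwise_lt (xs := pi)
        refine this.imp ?_
        intro a b hab x hx y hy
        rw [Prod.Lex.toLex_lt_toLex]
        exact Or.inl ((bof_fst pi a x hx).symm ▸ (bof_fst pi b y hy).symm ▸ hab)
  rw [hpairs]
  -- step 2: grouping the blocks yields one cell per color, ascending
  have hcells : (match ((asc.flatMap bof).foldl gstep ([], none)).2 with
      | some (cur, _) => ((asc.flatMap bof).foldl gstep ([], none)).1 ++ [cur]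
      | none => ((asc.flatMap bof).foldl gstep ([], none)).1)
      = asc.map (colorCell pi) := by
    have hmap : asc.map (fun c => (bof c).map (·.2)) = asc.map (colorCell pi) :=
      List.map_congr_left (fun c hc => bof_map_snd pi c)
    rcases ha : asc with _ | ⟨c, cs⟩
    · simp
    · have hcasc : c ∈ asc := by rw [ha]; exact List.mem_cons_self
      have hcpi : c ∈ pi := asc_mem pi c hcasc
      have hascpw : (c :: cs).Pairwise (· < ·) := by
        rw [← ha, hasc]; exact PySem.List.sorted_ofList_pairwise_lt pi
      rcases hb : bof c with _ | ⟨q, t⟩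
      · exact absurd hb (bof_ne pi c hcpi)
      have hq : q.1 = c := bof_fst pi c q (by rw [show List.filter (fun q => q.1 == c) (pairsL pi) = q :: t from hb]; exact List.mem_cons_self)
      have hstep1 : gstep ([], none) q = ([], some ([q.2], q.1)) := by simp [gstep]
      have hrun : t.foldl gstep ([], some ([q.2], c))
          = ([], some ([q.2] ++ t.map (·.2), c)) :=
        gstep_run t c (fun r hr => bof_fst pi c r (by rw [show List.filter (fun q => q.1 == c) (pairsL pi) = q :: t from hb]; exact List.mem_cons_of_mem q hr)) _ _
      have hblocks := gstep_blocks bof cs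
        (List.Pairwise.sublist (List.sublist_cons_self c cs) hascpw)
        (fun c' hc' => ⟨bof_ne pi c' (asc_mem pi c' (show c' ∈ asc by rw [ha]; exact List.mem_cons_of_mem c hc')),
          bof_fst pi c'⟩)
        [] ([q.2] ++ t.map (·.2)) c
        (fun c' hc' => (List.pairwise_cons.mp hascpw).1 c' hc')
      rw [List.flatMap_cons, List.foldl_append, hb, List.foldl_cons, hstep1, hq, hrun]
      have : flush ((cs.flatMap bof).foldl gstep ([], some ([q.2] ++ t.map (·.2), c)))
          = [] ++ [[q.2] ++ t.map (·.2)] ++ cs.map (fun c => (bof c).map (·.2)) := hblocks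
      unfold flush at this
      rw [this]
      have hfirst : [q.2] ++ t.map (·.2) = colorCell pi c := by
        rw [← bof_map_snd pi c, show List.filter (fun q => q.1 == c) (pairsL pi) = q :: t from hb]
        rfl
      rw [hfirst, List.nil_append,
        List.map_congr_left (fun c' (hc' : c' ∈ cs) => bof_map_snd pi c'), List.map_cons]
      rfl
  show PySem.List.sorted (match ((asc.flatMap bof).foldl gstep ([], none)).2 with
      | some (cur, _) => ((asc.flatMap bof).foldl gstep ([], none)).1 ++ [cur]
      | none => ((asc.flatMap bof).foldl gstep ([], none)).1)
    (fun cell => toLex ((cell.length : Int), PySem.List.pyGetD pi (PySem.List.pyGetD cell 0 0) 0)) false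
    = targetCells pi
  rw [hcells]
  -- step 3: the final sort orders the cells by (size, color)
  apply PySem.List.sorted_eq_of_perm_of_pairwise_lt
  · unfold targetCells
    exact ((PySem.List.sorted_perm (PySem.Set.ofList pi) _ false).trans
      (PySem.List.sorted_perm (PySem.Set.ofList pi) _ false).symm).map _
  · unfold targetCells
    rw [List.pairwise_map]
    refine (kc_pairwise pi).imp_of_mem ?_
    intro c c' hc hc' hlt
    have hcpi : c ∈ pi := by
      have := (PySem.List.mem_sorted _ _ _ _).mp hc
      rwa [PySem.Set.mem_ofList] at this
    have hcpi' : c' ∈ pi := by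
      have := (PySem.List.mem_sorted _ _ _ _).mp hc'
      rwa [PySem.Set.mem_ofList] at this
    simp only [Prod.Lex.toLex_lt_toLex] at hlt ⊢
    rw [cc_len, cc_len, cc_head pi c hcpi, cc_head pi c' hcpi']
    exact hlt

-- ===== VERDICT (by name: the statement is the Claim_ definition above) =====
theorem find_cells_spec : Claim_equal_find_cells := by
  intro pi _
  unfold Spec_find_cells
  rw [find_cells_eq_target, find_cells_alt_eq_target]
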